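-- pv_equiv track=rewrite | github.com/Fijuwat/CS-Projects | Quiz5D.py | firstPunctuationLocations
-- ===== SOURCE A (Python) =====
-- def firstPunctuationLocations(strings):
--     # replace pass with your solution to problem 2
--     final_result = {}
--     def test(word):
--       result = False
--       sentence = ".!?"
--       for x in sentence:
--           if word == x:
--               result = True
--       return result
--
--     for item in strings:
--         count = 0
--         for word in item:
--             if test(word):
--                 break
--             count += 1
--         final_result[item] = count
--
--     return final_result
-- ===== SOURCE B (Python) =====
-- def firstPunctuationLocations(strings):
--     result = {}
--     for item in strings:
--         positions = [p for p in (item.find(c) for c in ".!?") if p != -1]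
--         result[item] = min(positions, default=len(item))
--     return result
-- ===== Notes on version B (the rewrite author's own statement) =====
-- stated objective: idiomatic
-- what changed: Replaces A's hand-written per-character scan with break (plus its boolean membership helper) by three library str.find calls per string whose non-negative results are combined with min(..., default=len(item)).
import Mathlib
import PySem

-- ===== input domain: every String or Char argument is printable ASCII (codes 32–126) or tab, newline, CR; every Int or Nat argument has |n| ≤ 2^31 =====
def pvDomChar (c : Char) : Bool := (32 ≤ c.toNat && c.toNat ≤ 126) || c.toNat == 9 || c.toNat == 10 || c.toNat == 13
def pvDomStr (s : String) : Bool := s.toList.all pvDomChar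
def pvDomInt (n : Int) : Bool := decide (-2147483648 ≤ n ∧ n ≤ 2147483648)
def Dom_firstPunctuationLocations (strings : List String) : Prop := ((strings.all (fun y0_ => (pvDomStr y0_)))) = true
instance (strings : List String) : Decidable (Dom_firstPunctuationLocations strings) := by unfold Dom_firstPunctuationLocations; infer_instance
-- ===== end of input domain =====

-- B replaces A's hand-written scan-with-break (plus its char-membership helper) by three
-- library find calls per string combined with min/default (objective: idiomatic).

-- ===== PORT A =====
-- A's nested helper `test`: loop over ".!?" setting a boolean
def pvTestA (word : Char) : Bool :=
  ['.', '!', '?'].foldl (fun result x => if word = x then true else result) false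

-- A's inner `for word in item` loop with break, carrying `count`
def pvCountA : List Char → Int → Int
  | [], count => count
  | w :: ws, count => if pvTestA w then count else pvCountA ws (count + 1)

def firstPunctuationLocations (strings : List String) : List (String × Int) :=
  (strings.foldl (fun d item => d.insert item (pvCountA item.toList 0))
    (PySem.Dict.empty : PySem.Dict String Int)).items

-- ===== PORT B =====
-- B's per-item value: positions = [p for p in (item.find(c) for c in ".!?") if p != -1]; min(positions, default=len(item))
def pvFirstB (item : String) : Int :=
  let positions := ([".", "!", "?"].map (fun c => PySem.Str.find item c)).filter (fun p => p ≠ -1)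
  PySem.List.minD positions (fun p => p) (PySem.Str.len item)

def firstPunctuationLocations_alt (strings : List String) : List (String × Int) :=
  (strings.foldl (fun d item => d.insert item (pvFirstB item))
    (PySem.Dict.empty : PySem.Dict String Int)).items

-- ===== PRECONDITION & SPEC =====
def Spec_firstPunctuationLocations (strings : List String) (out : List (String × Int)) : Prop := out = firstPunctuationLocations_alt strings
instance (strings : List String) (out : List (String × Int)) : Decidable (Spec_firstPunctuationLocations strings out) := by unfold Spec_firstPunctuationLocations; infer_instance

-- ===== CLAIM (what is proved, stated in full; the proofs are below) =====
def Claim_equal_firstPunctuationLocations : Prop := ∀ (strings : List String), Dom_firstPunctuationLocations strings → Spec_firstPunctuationLocations strings (firstPunctuationLocations strings)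

-- ===== LEMMAS AND PROOFS =====

-- a one-char pattern is a prefix of l.drop i iff the element at i is that char
lemma prefix_single_iff (c : Char) (l : List Char) (i : Nat) :
    [c] <+: l.drop i ↔ l[i]? = some c := by
  constructor
  · rintro ⟨t, ht⟩
    have hi : i < l.length := by
      by_contra hge
      push_neg at hge
      rw [List.drop_eq_nil_of_le hge] at ht
      simp at ht
    have h2 : l[i] :: l.drop (i + 1) = [c] ++ t := (List.getElem_cons_drop hi).trans ht.symm
    simp only [List.singleton_append, List.cons.injEq] at h2
    simp [hi, h2.1]
  · intro he
    have hi : i < l.length := by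
      by_contra hge
      push_neg at hge
      rw [List.getElem?_eq_none hge] at he
      simp at he
    rw [List.getElem?_eq_getElem hi] at he
    refine ⟨l.drop (i + 1), ?_⟩
    rw [List.singleton_append, ← List.getElem_cons_drop hi, Option.some.inj he]

-- find of a one-char pattern: either absent, or it points to the first occurrence
lemma find_single_cases (c : Char) (l : List Char) :
    PySem.Chars.find l [c] = -1 ∨
      (0 ≤ PySem.Chars.find l [c] ∧ (PySem.Chars.find l [c]).toNat < l.length ∧
        l[(PySem.Chars.find l [c]).toNat]? = some c ∧
        ∀ i < (PySem.Chars.find l [c]).toNat, l[i]? ≠ some c) := by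
  by_cases h : PySem.Chars.find l [c] = -1
  · exact Or.inl h
  · right
    have hmem : [c] <:+: l := (PySem.Chars.find_ne_neg_one_iff l [c]).mp h
    have hnn : 0 ≤ PySem.Chars.find l [c] := (PySem.Chars.find_nonneg_iff l [c]).mpr hmem
    obtain ⟨hpre, hmin⟩ := PySem.Chars.find_spec hnn
    have hat : l[(PySem.Chars.find l [c]).toNat]? = some c := (prefix_single_iff c l _).mp hpre
    have hlt : (PySem.Chars.find l [c]).toNat < l.length := by
      by_contra hge
      push_neg at hge
      rw [List.getElem?_eq_none hge] at hat
      simp at hat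
    refine ⟨hnn, hlt, hat, ?_⟩
    intro i hi he
    exact hmin i hi ((prefix_single_iff c l i).mpr he)

lemma pvTestA_eq (w : Char) : pvTestA w = (w = '.' || w = '!' || w = '?') := by
  simp only [pvTestA, List.foldl]
  by_cases h1 : w = '.' <;> by_cases h2 : w = '!' <;> by_cases h3 : w = '?' <;>
    simp [h1, h2, h3]

lemma pvCountA_shift (l : List Char) (c : Int) : pvCountA l c = c + pvCountA l 0 := by
  induction l generalizing c with
  | nil => simp [pvCountA]
  | cons w ws ih =>
    simp only [pvCountA]
    split_ifs
    · simp
    · rw [ih (c + 1), ih (0 + 1)]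
      ring

lemma pvCountA_eq_findIdx (l : List Char) : pvCountA l 0 = (l.findIdx pvTestA : Int) := by
  induction l with
  | nil => simp [pvCountA]
  | cons w ws ih =>
    simp only [pvCountA, List.findIdx_cons]
    by_cases h : pvTestA w
    · simp [h]
    · rw [if_neg h, pvCountA_shift ws (0 + 1), ih]
      simp only [h, cond_false]
      push_cast
      ring

-- the heart: per-item, B's min-of-finds equals A's scan count
lemma per_item (s : String) : pvFirstB s = pvCountA s.toList 0 := by
  rw [pvCountA_eq_findIdx]
  unfold pvFirstB
  simp only [List.map, List.filter, PySem.Str.find_eq, PySem.Str.len_eq]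
  set l := s.toList with hl
  set k := l.findIdx pvTestA with hk
  have hkle : k ≤ l.length := List.findIdx_le_length
  by_cases hfound : k < l.length
  · -- some punctuation exists
    have hpk : pvTestA (l[k]'hfound) = true := List.findIdx_getElem
    -- any present find lands at or after k
    have hge : ∀ c : Char, (c = '.' ∨ c = '!' ∨ c = '?') →
        PySem.Chars.find l [c] = -1 ∨ (k : Int) ≤ PySem.Chars.find l [c] := by
      intro c hc
      rcases find_single_cases c l with h' | ⟨hnn, hlt, hat, _⟩
      · exact Or.inl h'
      · right
        by_contra hlt'
        push_neg at hlt'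
        have hjk : (PySem.Chars.find l [c]).toNat < k := by omega
        have hnp := List.not_of_lt_findIdx hjk
        rw [List.getElem?_eq_getElem hlt] at hat
        have hcc : l[(PySem.Chars.find l [c]).toNat]'hlt = c := Option.some.inj hat
        have hfc : pvTestA c = false := by rw [← hcc]; exact hnp
        rw [pvTestA_eq] at hfc
        rcases hc with h | h | h <;> simp [h] at hfc
    -- the find for l[k]'s own char is exactly k
    have heq : ∀ c : Char, (c = '.' ∨ c = '!' ∨ c = '?') → l[k]'hfound = c →
        PySem.Chars.find l [c] = (k : Int) := by
      intro c hc hck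
      have hpre : [c] <+: l.drop k :=
        (prefix_single_iff c l k).mpr (by rw [List.getElem?_eq_getElem hfound, hck])
      rcases find_single_cases c l with h' | ⟨hnn, hlt, hat, hmin⟩
      · rw [PySem.Chars.find_eq_neg_one_iff] at h'
        exact absurd ((List.infix_iff_prefix_suffix).mpr
          ⟨_, hpre, List.drop_suffix k l⟩) h'
      · have hle : (PySem.Chars.find l [c]).toNat ≤ k := by
          by_contra hgt
          push_neg at hgt
          exact hmin k hgt (by rw [List.getElem?_eq_getElem hfound, hck])
        rcases hge c hc with h' | h'
        · omega
        · omega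
    have hpk' := hpk
    rw [pvTestA_eq] at hpk'
    simp only [Bool.or_eq_true, decide_eq_true_eq] at hpk'
    have hex : PySem.Chars.find l ['.'] = (k : Int) ∨ PySem.Chars.find l ['!'] = (k : Int) ∨
        PySem.Chars.find l ['?'] = (k : Int) :=
      hpk'.elim
        (fun h12 => h12.elim (fun h => Or.inl (heq '.' (Or.inl rfl) h))
          (fun h => Or.inr (Or.inl (heq '!' (Or.inr (Or.inl rfl)) h))))
        (fun h => Or.inr (Or.inr (heq '?' (Or.inr (Or.inr rfl)) h)))
    have h1 := hge '.' (Or.inl rfl)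
    have h2 := hge '!' (Or.inr (Or.inl rfl))
    have h3 := hge '?' (Or.inr (Or.inr rfl))
    by_cases hc1 : PySem.Chars.find l ['.'] = -1 <;>
      by_cases hc2 : PySem.Chars.find l ['!'] = -1 <;>
      by_cases hc3 : PySem.Chars.find l ['?'] = -1 <;>
      simp [hc1, hc2, hc3, PySem.List.minD, PySem.List.min?, List.foldl] <;>
      (try split_ifs) <;> (try simp_all) <;> (try split_ifs) <;> (try simp_all) <;> omega
  · -- no punctuation: all three finds are -1
    have hnone : ∀ c ∈ l, pvTestA c = false := by
      intro x hx
      by_contra hpx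
      have : k < l.length := List.findIdx_lt_length.mpr ⟨x, hx, by simpa using hpx⟩
      omega
    have habs : ∀ c : Char, (c = '.' ∨ c = '!' ∨ c = '?') → PySem.Chars.find l [c] = -1 := by
      intro c hc
      rw [PySem.Chars.find_eq_neg_one_iff, List.singleton_infix_iff]
      intro hmem
      have := hnone c hmem
      rw [pvTestA_eq] at this
      rcases hc with h | h | h <;> simp [h] at this
    have h1 := habs '.' (Or.inl rfl)
    have h2 := habs '!' (Or.inr (Or.inl rfl))
    have h3 := habs '?' (Or.inr (Or.inr rfl))
    have hkl : k = l.length := by omega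
    simp [h1, h2, h3, PySem.List.minD, PySem.List.min?, hkl]

lemma folds_eq (strings : List String) (d : PySem.Dict String Int) :
    strings.foldl (fun d item => d.insert item (pvCountA item.toList 0)) d =
    strings.foldl (fun d item => d.insert item (pvFirstB item)) d := by
  induction strings generalizing d with
  | nil => rfl
  | cons s rest ih => simp only [List.foldl]; rw [per_item s]; exact ih _

-- ===== VERDICT (by name: the statement is the Claim_ definition above) =====
theorem firstPunctuationLocations_spec : Claim_equal_firstPunctuationLocations := by
  intro strings _
  unfold Spec_firstPunctuationLocations firstPunctuationLocations firstPunctuationLocations_alt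
  rw [folds_eq]
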